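-- pv_equiv track=rewrite | github.com/filip-porebski/adventofcode-2025 | Day8/main.py | _component_sizes_after_k_edges
-- ===== SOURCE A (Python) =====
-- from typing import List
--
-- def _sorted_edges(points: List[tuple[int, int, int]]) -> List[tuple[int, int, int]]:
--     edges: List[tuple[int, int, int]] = []
--     for i, (x1, y1, z1) in enumerate(points):
--         for j in range(i + 1, len(points)):
--             x2, y2, z2 = points[j]
--             dist_sq = (x1 - x2) ** 2 + (y1 - y2) ** 2 + (z1 - z2) ** 2
--             edges.append((dist_sq, i, j))
--     edges.sort(key=lambda e: e[0])
--     return edges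
--
-- def _component_sizes_after_k_edges(points: List[tuple[int, int, int]], k: int) -> List[int]:
--     """
--     Connect the k closest pairs (by Euclidean distance) and return component sizes.
--     """
--     n = len(points)
--     edges = _sorted_edges(points)
--
--     parents = list(range(n))
--     sizes = [1] * n
--
--     def find(a: int) -> int:
--         while parents[a] != a:
--             parents[a] = parents[parents[a]]
--             a = parents[a]
--         return a
--
--     def union(a: int, b: int) -> None:
--         ra, rb = find(a), find(b)
--         if ra == rb:
--             return
--         if sizes[ra] < sizes[rb]:
--             ra, rb = rb, ra
--         parents[rb] = ra
--         sizes[ra] += sizes[rb]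
--
--     for _, a, b in edges[:k]:
--         union(a, b)
--
--     comp_sizes: List[int] = []
--     for idx in range(n):
--         root = find(idx)
--         if root == idx:
--             comp_sizes.append(sizes[root])
--
--     comp_sizes.sort(reverse=True)
--     return comp_sizes
-- ===== SOURCE B (Python) =====
-- from typing import List
--
--
-- def _component_sizes_after_k_edges(points: List[tuple[int, int, int]], k: int) -> List[int]:
--     """
--     Connect the k closest pairs (by Euclidean distance) and return component sizes.
--
--     Same edge list and stable sort as the original; components are tracked with a
--     flat label array (merge = relabel) instead of a union-find forest, and the
--     sizes are read off with a counting dict at the end.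
--     """
--     n = len(points)
--     edges = [((points[i][0] - points[j][0]) ** 2
--               + (points[i][1] - points[j][1]) ** 2
--               + (points[i][2] - points[j][2]) ** 2, i, j)
--              for i in range(n) for j in range(i + 1, n)]
--     edges.sort(key=lambda e: e[0])
--
--     comp = list(range(n))
--     for _, a, b in edges[:k]:
--         la, lb = comp[a], comp[b]
--         if la != lb:
--             comp = [la if c == lb else c for c in comp]
--
--     counts: dict = {}
--     for c in comp:
--         counts[c] = counts.get(c, 0) + 1
--     return sorted(counts.values(), reverse=True)
-- ===== Notes on version B (the rewrite author's own statement) =====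
-- stated objective: simpler
-- what changed: Union-find with path compression and union by size is replaced by a flat component-label array (merging two components = one relabelling pass) and the final sizes are read off with a counting dict instead of walking roots.
import Mathlib
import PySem

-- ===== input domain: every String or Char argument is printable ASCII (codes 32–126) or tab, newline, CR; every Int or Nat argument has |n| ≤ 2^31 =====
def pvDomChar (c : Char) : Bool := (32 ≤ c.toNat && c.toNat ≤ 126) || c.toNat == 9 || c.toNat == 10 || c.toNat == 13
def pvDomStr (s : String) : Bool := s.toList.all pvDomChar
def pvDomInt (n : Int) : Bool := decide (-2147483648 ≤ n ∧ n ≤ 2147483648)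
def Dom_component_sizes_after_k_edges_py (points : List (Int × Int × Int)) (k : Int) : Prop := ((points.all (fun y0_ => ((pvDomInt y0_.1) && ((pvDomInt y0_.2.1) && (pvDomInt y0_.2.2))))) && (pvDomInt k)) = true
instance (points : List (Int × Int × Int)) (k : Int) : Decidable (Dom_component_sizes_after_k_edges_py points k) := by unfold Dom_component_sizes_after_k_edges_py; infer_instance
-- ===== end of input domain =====

-- B replaces the union-find (path halving + union by size) of A by a flat component-label
-- array (a merge relabels in one pass) and reads the sizes off a counting dict: simpler, not faster.
-- ===== PORT A =====
-- helper: _sorted_edges (nested loops appending (dist_sq, i, j), then stable sort by dist_sq)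
def sortedEdges_py (points : List (Int × Int × Int)) : List (Int × Int × Int) :=
  let edges := (PySem.List.enumerate points 0).foldl (fun acc ip =>
    (PySem.List.pyRange (ip.1 + 1) (points.length : Int) 1).foldl (fun acc2 j =>
      let p2 := PySem.List.pyGetD points j (0, 0, 0)   -- j is always in range here
      let dist_sq := (ip.2.1 - p2.1) ^ 2 + (ip.2.2.1 - p2.2.1) ^ 2 + (ip.2.2.2 - p2.2.2) ^ 2
      acc2 ++ [(dist_sq, ip.1, j)]) acc) []
  PySem.List.sorted edges (fun e => e.1) false

-- 'find' with path halving; the while loop runs with fuel = len(parents), enough on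
-- every reachable union-find state (chains are shorter than the list; proved below)
def pvFind (fuel : Nat) (parents : List Int) (a : Int) : List Int × Int :=
  match fuel with
  | 0 => (parents, a)
  | Nat.succ f =>
    let pa := PySem.List.pyGetD parents a 0          -- parents[a]; index always valid here
    if pa = a then (parents, a)
    else
      let g := PySem.List.pyGetD parents pa 0        -- parents[parents[a]]
      pvFind f (PySem.List.pySetD parents a g) g

def pvUnion (parents sizes : List Int) (a b : Int) : List Int × List Int :=
  let fa := pvFind parents.length parents a
  let fb := pvFind fa.1.length fa.1 b
  let parents2 := fb.1
  if fa.2 = fb.2 then (parents2, sizes)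
  else
    let pr := if PySem.List.pyGetD sizes fa.2 0 < PySem.List.pyGetD sizes fb.2 0
              then (fb.2, fa.2) else (fa.2, fb.2)
    (PySem.List.pySetD parents2 pr.2 pr.1,
     PySem.List.pySetD sizes pr.1 (PySem.List.pyGetD sizes pr.1 0 + PySem.List.pyGetD sizes pr.2 0))

def component_sizes_after_k_edges_py (points : List (Int × Int × Int)) (k : Int) : List Int :=
  let n := points.length
  let edges := sortedEdges_py points
  let parents := PySem.List.pyRange 0 (n : Int) 1
  let sizes : List Int := List.replicate n 1
  let st := (PySem.List.slice edges none (some k)).foldl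
      (fun st e => pvUnion st.1 st.2 e.2.1 e.2.2) (parents, sizes)
  let fin := (PySem.List.pyRange 0 (n : Int) 1).foldl
      (fun acc idx =>
        let fr := pvFind acc.1.length acc.1 idx
        if fr.2 = idx then (fr.1, acc.2 ++ [PySem.List.pyGetD st.2 fr.2 0]) else (fr.1, acc.2))
      (st.1, ([] : List Int))
  PySem.List.sorted fin.2 (fun x => x) true

-- ===== PORT B =====
def component_sizes_after_k_edges_py_alt (points : List (Int × Int × Int)) (k : Int) : List Int :=
  let n := points.length
  let edges := (PySem.List.pyRange 0 (n : Int) 1).flatMap (fun i =>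
    (PySem.List.pyRange (i + 1) (n : Int) 1).map (fun j =>
      let pi := PySem.List.pyGetD points i (0, 0, 0)   -- i, j always in range
      let pj := PySem.List.pyGetD points j (0, 0, 0)
      ((pi.1 - pj.1) ^ 2 + (pi.2.1 - pj.2.1) ^ 2 + (pi.2.2 - pj.2.2) ^ 2, i, j)))
  let sortedE := PySem.List.sorted edges (fun e => e.1) false
  let comp := (PySem.List.slice sortedE none (some k)).foldl
      (fun comp e =>
        let la := PySem.List.pyGetD comp e.2.1 0
        let lb := PySem.List.pyGetD comp e.2.2 0
        if la ≠ lb then comp.map (fun c => if c = lb then la else c) else comp)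
      (PySem.List.pyRange 0 (n : Int) 1)
  let counts := comp.foldl (fun d c => PySem.Dict.modify d c 0 (· + 1)) PySem.Dict.empty
  PySem.List.sorted counts.values (fun x => x) true




-- ===== PRECONDITION & SPEC =====
def Spec_component_sizes_after_k_edges_py (points : List (Int × Int × Int)) (k : Int) (out : List Int) : Prop := out = component_sizes_after_k_edges_py_alt points k
instance (points : List (Int × Int × Int)) (k : Int) (out : List Int) : Decidable (Spec_component_sizes_after_k_edges_py points k out) := by unfold Spec_component_sizes_after_k_edges_py; infer_instance

-- ===== CLAIM (what is proved, stated in full; the proofs are below) =====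
def Claim_equal_component_sizes_after_k_edges_py : Prop := ∀ (points : List (Int × Int × Int)) (k : Int), Dom_component_sizes_after_k_edges_py points k → Spec_component_sizes_after_k_edges_py points k (component_sizes_after_k_edges_py points k)

-- ===== LEMMAS AND PROOFS =====
-- ===== abstract union-find layer =====
def pvStep (p : List Int) (i : Nat) : Nat := (p.getD i 0).toNat
def pvBnd (p : List Int) : Prop := ∀ i, i < p.length → 0 ≤ p.getD i 0 ∧ (p.getD i 0).toNat < p.length
def pvNR (p : List Int) : Nat := ((Finset.range p.length).filter (fun i => pvStep p i ≠ i)).card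
def pvTerm (p : List Int) : Prop :=
  ∀ i, i < p.length → ∃ m, m ≤ pvNR p ∧ pvStep p ((pvStep p)^[m] i) = (pvStep p)^[m] i
def pvReach (p : List Int) (i r : Nat) : Prop :=
  ∃ m, (pvStep p)^[m] i = r ∧ pvStep p r = r

lemma pvReach_unique {p : List Int} {i r r' : Nat} (h1 : pvReach p i r) (h2 : pvReach p i r') :
    r = r' := by
  obtain ⟨m, hm, hr⟩ := h1
  obtain ⟨m', hm', hr'⟩ := h2
  rcases le_total m m' with h | h
  · have : (pvStep p)^[m' - m + m] i = r' := by rw [Nat.sub_add_cancel h]; exact hm'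
    rw [Function.iterate_add_apply, hm, Function.iterate_fixed hr] at this
    omega
  · have : (pvStep p)^[m - m' + m'] i = r := by rw [Nat.sub_add_cancel h]; exact hm
    rw [Function.iterate_add_apply, hm', Function.iterate_fixed hr'] at this
    omega

lemma pvStep_lt {p : List Int} (hb : pvBnd p) {i : Nat} (hi : i < p.length) :
    pvStep p i < p.length := (hb i hi).2

lemma pvIterate_lt {p : List Int} (hb : pvBnd p) {i : Nat} (hi : i < p.length) :
    ∀ m, (pvStep p)^[m] i < p.length := by
  intro m
  induction m with
  | zero => simpa
  | succ m ih => rw [Function.iterate_succ_apply']; exact pvStep_lt hb ih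

lemma pvNR_lt {p : List Int} (hb : pvBnd p) (ht : pvTerm p) (hn : 0 < p.length) :
    pvNR p < p.length := by
  obtain ⟨m, _, hfix⟩ := ht 0 hn
  have hr : (pvStep p)^[m] 0 < p.length := pvIterate_lt hb hn m
  have hsub : ((Finset.range p.length).filter (fun i => pvStep p i ≠ i)) ⊂ Finset.range p.length := by
    constructor
    · exact Finset.filter_subset _ _
    · intro hsup
      have := hsup (Finset.mem_range.mpr hr)
      rw [Finset.mem_filter] at this
      exact this.2 hfix
  simpa [pvNR] using Finset.card_lt_card hsub

lemma pvNoReturn {p : List Int} {a m : Nat}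
    (hm : pvStep p ((pvStep p)^[m] a) = (pvStep p)^[m] a) (hne : pvStep p a ≠ a) :
    ∀ t, 0 < t → (pvStep p)^[t] a ≠ a := by
  intro t ht heq
  have hm1 : 1 ≤ m := by
    rcases Nat.eq_zero_or_pos m with h | h
    · subst h; simp at hm; exact absurd hm hne
    · exact h
  have hper : ∀ q, (pvStep p)^[q * t] a = a := by
    intro q
    induction q with
    | zero => simp
    | succ q ih => rw [Nat.succ_mul, Function.iterate_add_apply, heq]; exact ih
  have hge : m ≤ m * t := Nat.le_mul_of_pos_right m ht
  have h1 : (pvStep p)^[m * t] a = (pvStep p)^[m] a := by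
    have : (pvStep p)^[m * t - m + m] a = (pvStep p)^[m * t] a := by
      rw [Nat.sub_add_cancel hge]
    rw [← this, Function.iterate_add_apply, Function.iterate_fixed hm]
  have ha : (pvStep p)^[m] a = a := by rw [← h1, hper]
  rw [ha] at hm
  exact hne hm

lemma pvStep_set {p : List Int} {aN : Nat} (v : Int) (ha : aN < p.length) (i : Nat) :
    pvStep (p.set aN v) i = if i = aN then v.toNat else pvStep p i := by
  unfold pvStep
  split_ifs with h
  · subst h
    rw [List.getD_eq_getElem?_getD, List.getElem?_set_self (by simpa using ha)]
    simp
  · rw [List.getD_eq_getElem?_getD, List.getElem?_set_ne (by omega), ← List.getD_eq_getElem?_getD]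
-- ===== path-halving step lemmas =====
-- context: p' = p.set aN (p.getD (pvStep p aN) 0)

lemma pvHalve_step {p : List Int} {aN : Nat} (hb : pvBnd p) (ha : aN < p.length) (i : Nat) :
    pvStep (p.set aN (p.getD (pvStep p aN) 0)) i
      = if i = aN then pvStep p (pvStep p aN) else pvStep p i := by
  rw [pvStep_set _ ha]
  rfl

lemma pvHalve_bnd {p : List Int} {aN : Nat} (hb : pvBnd p) (ha : aN < p.length) :
    pvBnd (p.set aN (p.getD (pvStep p aN) 0)) := by
  intro i hi
  rw [List.length_set] at hi
  have h1 : pvStep p aN < p.length := pvStep_lt hb ha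
  have h2 := hb (pvStep p aN) h1
  rcases eq_or_ne i aN with h | h
  · subst h
    rw [List.getD_eq_getElem?_getD, List.getElem?_set_self (by simpa using ha)]
    simpa [List.length_set] using h2
  · rw [List.getD_eq_getElem?_getD, List.getElem?_set_ne (by omega), ← List.getD_eq_getElem?_getD,
      List.length_set]
    exact hb i hi

lemma pvHalve_NR {p : List Int} {aN m : Nat} (hb : pvBnd p) (ha : aN < p.length)
    (hne : pvStep p aN ≠ aN)
    (hm : pvStep p ((pvStep p)^[m] aN) = (pvStep p)^[m] aN) :
    pvNR (p.set aN (p.getD (pvStep p aN) 0)) = pvNR p := by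
  unfold pvNR
  rw [List.length_set]
  congr 1
  apply Finset.filter_congr
  intro i hi
  rw [pvHalve_step hb ha]
  by_cases h : i = aN
  · have hg : pvStep p (pvStep p aN) ≠ aN := by
      have := pvNoReturn hm hne 2 (by omega)
      simpa [Function.iterate_succ_apply] using this
    rw [h, if_pos rfl]
    constructor
    · intro _; exact hne
    · intro _; exact hg
  · simp [h]

lemma pvHalve_chain {p : List Int} {aN : Nat} (hb : pvBnd p) (ha : aN < p.length)
    (hne : pvStep p aN ≠ aN)
    {mr : Nat} (hmr : pvStep p ((pvStep p)^[mr] aN) = (pvStep p)^[mr] aN) :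
    ∀ mm i r, (pvStep p)^[mm] i = r → pvStep p r = r →
      ∃ mm' ≤ mm, (pvStep (p.set aN (p.getD (pvStep p aN) 0)))^[mm'] i = r ∧
        pvStep (p.set aN (p.getD (pvStep p aN) 0)) r = r := by
  have hra : ∀ r, pvStep p r = r → r ≠ aN := by
    intro r hr heq; subst heq; exact hne hr
  have hfix' : ∀ r, pvStep p r = r → pvStep (p.set aN (p.getD (pvStep p aN) 0)) r = r := by
    intro r hr
    rw [pvHalve_step hb ha, if_neg (hra r hr)]
    exact hr
  intro mm
  induction mm using Nat.strong_induction_on with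
  | _ mm ih =>
    intro i r hchain hr
    match mm, hchain with
    | 0, hchain =>
      exact ⟨0, le_refl _, by simpa using hchain, hfix' r hr⟩
    | Nat.succ mm, hchain =>
      rcases eq_or_ne i aN with hia | hia
      · subst hia
        rcases Nat.eq_zero_or_pos mm with hmm | hmm
        · subst hmm
          -- f aN = r fixed, so f (f aN) = f aN = r
          simp only [Function.iterate_one] at hchain
          refine ⟨1, le_refl _, ?_, hfix' r hr⟩
          simp only [Function.iterate_one]
          rw [pvHalve_step hb ha, if_pos rfl, hchain, hr]
        · -- mm ≥ 1 : chain aN → f² aN → … ; apply ih at (f² aN) with mm - 1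
          have hch2 : (pvStep p)^[mm - 1] ((pvStep p)^[2] i) = r := by
            rw [← Function.iterate_add_apply]
            have : mm - 1 + 2 = mm + 1 := by omega
            rw [this]; exact hchain
          obtain ⟨mm', hle, hch', hfix''⟩ := ih (mm - 1) (by omega) _ r hch2 hr
          refine ⟨mm' + 1, by omega, ?_, hfix''⟩
          rw [Function.iterate_succ_apply, pvHalve_step hb ha, if_pos rfl]
          simpa [Function.iterate_succ_apply] using hch'
      · have hch2 : (pvStep p)^[mm] (pvStep p i) = r := by
          rw [← Function.iterate_succ_apply]; exact hchain
        obtain ⟨mm', hle, hch', hfix''⟩ := ih mm (by omega) _ r hch2 hr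
        refine ⟨mm' + 1, by omega, ?_, hfix''⟩
        rw [Function.iterate_succ_apply, pvHalve_step hb ha, if_neg hia]
        exact hch'

lemma pvHalve_term {p : List Int} {aN : Nat} (hb : pvBnd p) (ha : aN < p.length)
    (hne : pvStep p aN ≠ aN)
    {mr : Nat} (hmr : pvStep p ((pvStep p)^[mr] aN) = (pvStep p)^[mr] aN)
    (ht : pvTerm p) :
    pvTerm (p.set aN (p.getD (pvStep p aN) 0)) := by
  intro i hi
  rw [List.length_set] at hi
  obtain ⟨m, hmle, hfix⟩ := ht i hi
  obtain ⟨mm', hle, hch, hfx⟩ := pvHalve_chain hb ha hne hmr m i _ rfl hfix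
  refine ⟨mm', ?_, ?_⟩
  · rw [pvHalve_NR hb ha hne hmr]; omega
  · rw [hch]; exact hfx

lemma pvHalve_reach {p : List Int} {aN : Nat} (hb : pvBnd p) (ha : aN < p.length)
    (hne : pvStep p aN ≠ aN)
    {mr : Nat} (hmr : pvStep p ((pvStep p)^[mr] aN) = (pvStep p)^[mr] aN) :
    ∀ i r, pvReach p i r → pvReach (p.set aN (p.getD (pvStep p aN) 0)) i r := by
  intro i r ⟨m, hch, hfx⟩
  obtain ⟨mm', _, hch', hfx'⟩ := pvHalve_chain hb ha hne hmr m i r hch hfx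
  exact ⟨mm', hch', hfx'⟩
-- ===== find specification =====
lemma pvCast_getD {p : List Int} (hb : pvBnd p) {i : Nat} (hi : i < p.length) :
    p.getD i 0 = ((pvStep p i : Nat) : Int) := by
  have := (hb i hi).1
  unfold pvStep
  omega

lemma pvFind_spec :
    ∀ m : Nat, ∀ (p : List Int) (aN fuel r : Nat),
      pvBnd p → pvTerm p → aN < p.length →
      (pvStep p)^[m] aN = r → pvStep p r = r → m < fuel →
      ∃ p', pvFind fuel p (aN : Int) = (p', (r : Int)) ∧
        p'.length = p.length ∧ pvBnd p' ∧ pvNR p' = pvNR p ∧ pvTerm p' ∧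
        (∀ i rr, pvReach p i rr → pvReach p' i rr) := by
  intro m
  induction m using Nat.strong_induction_on with
  | _ m ih =>
    intro p aN fuel r hb ht ha hch hr hfuel
    obtain ⟨fuel, rfl⟩ : ∃ f, fuel = f + 1 := ⟨fuel - 1, by omega⟩
    rw [pvFind]
    simp only [PySem.List.pyGetD_natCast]
    by_cases hfix : pvStep p aN = aN
    · -- parents[a] == a : return
      rw [if_pos (by rw [pvCast_getD hb ha, hfix])]
      have : r = aN := by rw [← hch, Function.iterate_fixed hfix]
      subst this
      exact ⟨p, rfl, rfl, hb, rfl, ht, fun i rr h => h⟩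
    · have hne' : ¬ p.getD aN 0 = (aN : Int) := by
        rw [pvCast_getD hb ha]
        intro h
        exact hfix (by exact_mod_cast h)
      rw [if_neg hne']
      -- g = parents[parents[a]]
      have hpa : pvStep p aN < p.length := pvStep_lt hb ha
      have hm1 : 1 ≤ m := by
        rcases Nat.eq_zero_or_pos m with h | h
        · exfalso; subst h; simp at hch; subst hch; exact hfix hr
        · exact h
      rw [pvCast_getD hb ha, PySem.List.pyGetD_natCast, PySem.List.pySetD_natCast]
      have hgd : p.getD (pvStep p aN) 0 = ((pvStep p (pvStep p aN) : Nat) : Int) :=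
        pvCast_getD hb hpa
      set p' := p.set aN (p.getD (pvStep p aN) 0) with hp'
      have hmr : pvStep p ((pvStep p)^[m] aN) = (pvStep p)^[m] aN := by rw [hch]; exact hr
      have hb' : pvBnd p' := pvHalve_bnd hb ha
      have ht' : pvTerm p' := pvHalve_term hb ha hfix hmr ht
      have hNR' : pvNR p' = pvNR p := pvHalve_NR hb ha hfix hmr
      have hreach' := pvHalve_reach hb ha hfix hmr
      have hlen' : p'.length = p.length := by rw [hp', List.length_set]
      have hg2 : pvStep p (pvStep p aN) < p.length := pvStep_lt hb hpa
      -- chain of g in p'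
      have hkey : ∃ m' ≤ m - 1, (pvStep p')^[m'] (pvStep p (pvStep p aN)) = r ∧
          pvStep p' r = r := by
        rcases Nat.lt_or_ge m 2 with h2 | h2
        · -- m = 1 : r = f aN, and f (f aN) = r
          have hm2 : m = 1 := by omega
          subst hm2
          simp only [Function.iterate_one] at hch
          have : pvStep p (pvStep p aN) = r := by rw [hch]; exact hr
          refine ⟨0, by omega, by simpa using this, ?_⟩
          obtain ⟨mm', _, _, hfx⟩ := pvHalve_chain hb ha hfix hmr 1 aN r
            (by simpa using hch) hr
          exact hfx
        · have hch2 : (pvStep p)^[m - 2] ((pvStep p)^[2] aN) = r := by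
            rw [← Function.iterate_add_apply]
            have : m - 2 + 2 = m := by omega
            rw [this]; exact hch
          have h2' : (pvStep p)^[2] aN = pvStep p (pvStep p aN) := by
            simp [Function.iterate_succ_apply]
          rw [h2'] at hch2
          obtain ⟨mm', hle, hch', hfx⟩ := pvHalve_chain hb ha hfix hmr (m - 2) _ r hch2 hr
          exact ⟨mm', by omega, hch', hfx⟩
      obtain ⟨m', hm'le, hch', hr'⟩ := hkey
      rw [hgd]
      obtain ⟨p'', heq, hlen'', hb'', hNR'', ht'', hreach''⟩ :=
        ih m' (by omega) p' (pvStep p (pvStep p aN)) fuel r hb' ht'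
          (hlen' ▸ hg2) hch' hr' (by omega)
      refine ⟨p'', heq, by omega, hb'', by rw [hNR'', hNR'], ht'', ?_⟩
      intro i rr h
      exact hreach'' i rr (hreach' i rr h)
-- ===== linking (parents[rb] = ra) step lemmas =====
-- context: p' = p.set att ((keep : Nat) : Int), att/keep distinct roots

lemma pvLink_step {p : List Int} {att keep : Nat} (ha : att < p.length) (i : Nat) :
    pvStep (p.set att ((keep : Nat) : Int)) i = if i = att then keep else pvStep p i := by
  rw [pvStep_set _ ha]
  simp

lemma pvLink_bnd {p : List Int} {att keep : Nat} (hb : pvBnd p)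
    (ha : att < p.length) (hk : keep < p.length) :
    pvBnd (p.set att ((keep : Nat) : Int)) := by
  intro i hi
  rw [List.length_set] at hi
  rcases eq_or_ne i att with h | h
  · subst h
    rw [List.getD_eq_getElem?_getD, List.getElem?_set_self (by simpa using ha)]
    simp [List.length_set]
    omega
  · rw [List.getD_eq_getElem?_getD, List.getElem?_set_ne (by omega), ← List.getD_eq_getElem?_getD,
      List.length_set]
    exact hb i hi

lemma pvLink_NR {p : List Int} {att keep : Nat} (ha : att < p.length)
    (hratt : pvStep p att = att) (hne : keep ≠ att) :
    pvNR (p.set att ((keep : Nat) : Int)) = pvNR p + 1 := by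
  unfold pvNR
  rw [List.length_set]
  have hset : (Finset.range p.length).filter
        (fun i => pvStep (p.set att ((keep : Nat) : Int)) i ≠ i)
      = insert att ((Finset.range p.length).filter (fun i => pvStep p i ≠ i)) := by
    ext i
    simp only [Finset.mem_filter, Finset.mem_insert, Finset.mem_range, pvLink_step ha]
    constructor
    · rintro ⟨hi, hne'⟩
      by_cases h : i = att
      · exact Or.inl h
      · rw [if_neg h] at hne'; exact Or.inr ⟨hi, hne'⟩
    · rintro (h | ⟨hi, hne'⟩)
      · subst h
        exact ⟨ha, by rw [if_pos rfl]; exact fun h => hne (by omega)⟩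
      · refine ⟨hi, ?_⟩
        rw [if_neg (by intro h; subst h; exact hne' hratt)]
        exact hne'
  rw [hset, Finset.card_insert_of_notMem (by simp [hratt])]

lemma pvLink_chain {p : List Int} {att keep : Nat} (ha : att < p.length)
    (hratt : pvStep p att = att) (hrkeep : pvStep p keep = keep) (hne : keep ≠ att) :
    ∀ mm i r, (pvStep p)^[mm] i = r → pvStep p r = r →
      ∃ mm' ≤ mm + 1, (pvStep (p.set att ((keep : Nat) : Int)))^[mm'] i = (if r = att then keep else r) ∧
        pvStep (p.set att ((keep : Nat) : Int)) (if r = att then keep else r) = (if r = att then keep else r) := by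
  have hfix' : ∀ r, pvStep p r = r →
      pvStep (p.set att ((keep : Nat) : Int)) (if r = att then keep else r) = (if r = att then keep else r) := by
    intro r hr
    by_cases h : r = att
    · rw [if_pos h, pvLink_step ha, if_neg hne]
      exact hrkeep
    · rw [if_neg h, pvLink_step ha, if_neg h]
      exact hr
  intro mm
  induction mm with
  | zero =>
    intro i r hch hr
    simp only [Function.iterate_zero, id] at hch
    subst hch
    by_cases h : i = att
    · refine ⟨1, by omega, ?_, hfix' i hr⟩
      rw [if_pos h, Function.iterate_one, pvLink_step ha, if_pos h]
    · refine ⟨0, by omega, ?_, hfix' i hr⟩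
      rw [if_neg h]
      rfl
  | succ mm ih =>
    intro i r hch hr
    by_cases h : i = att
    · -- att is a root: chain stays at att, so r = att
      have hr' : r = att := by
        have h2 : (pvStep p)^[mm + 1] att = att := Function.iterate_fixed hratt _
        rw [h, h2] at hch
        omega
      refine ⟨1, by omega, ?_, hfix' _ hr⟩
      rw [hr', if_pos rfl, Function.iterate_one, pvLink_step ha, h, if_pos rfl]
    · have hch2 : (pvStep p)^[mm] (pvStep p i) = r := by
        rw [← Function.iterate_succ_apply]; exact hch
      obtain ⟨mm', hle, hch', hfx⟩ := ih _ r hch2 hr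
      refine ⟨mm' + 1, by omega, ?_, hfx⟩
      rw [Function.iterate_succ_apply, pvLink_step ha, if_neg h]
      exact hch'

lemma pvLink_term {p : List Int} {att keep : Nat} (ha : att < p.length)
    (hratt : pvStep p att = att) (hrkeep : pvStep p keep = keep) (hne : keep ≠ att)
    (ht : pvTerm p) :
    pvTerm (p.set att ((keep : Nat) : Int)) := by
  intro i hi
  rw [List.length_set] at hi
  obtain ⟨m, hmle, hfix⟩ := ht i hi
  obtain ⟨mm', hle, hch, hfx⟩ := pvLink_chain ha hratt hrkeep hne m i _ rfl hfix
  refine ⟨mm', ?_, by rw [hch]; exact hfx⟩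
  rw [pvLink_NR ha hratt hne]
  omega

lemma pvLink_reach {p : List Int} {att keep : Nat} (ha : att < p.length)
    (hratt : pvStep p att = att) (hrkeep : pvStep p keep = keep) (hne : keep ≠ att) :
    ∀ i r, pvReach p i r →
      pvReach (p.set att ((keep : Nat) : Int)) i (if r = att then keep else r) := by
  intro i r ⟨m, hch, hfx⟩
  obtain ⟨mm', _, hch', hfx'⟩ := pvLink_chain ha hratt hrkeep hne m i r hch hfx
  exact ⟨mm', hch', hfx'⟩
-- ===== helpers on lists =====
lemma pvGetD_set_self (l : List Int) (u : Nat) (v : Int) (hu : u < l.length) :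
    (l.set u v).getD u 0 = v := by
  rw [List.getD_eq_getElem?_getD, List.getElem?_set_self (by simpa using hu)]
  simp

lemma pvGetD_set_ne (l : List Int) (u : Nat) (v : Int) (i : Nat) (h : i ≠ u) :
    (l.set u v).getD i 0 = l.getD i 0 := by
  rw [List.getD_eq_getElem?_getD, List.getElem?_set_ne (by omega), ← List.getD_eq_getElem?_getD]

lemma pvGetD_map_collapse (comp : List Int) (la lb : Int) (i : Nat) (hi : i < comp.length) :
    (comp.map (fun c => if c = lb then la else c)).getD i 0
      = if comp.getD i 0 = lb then la else comp.getD i 0 := by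
  rw [List.getD_eq_getElem?_getD, List.getElem?_map, List.getElem?_eq_getElem hi,
    List.getD_eq_getElem?_getD, List.getElem?_eq_getElem hi]
  simp

lemma pvCount_map_collapse_self (l : List Int) (la lb : Int) (h : la ≠ lb) :
    (l.map (fun c => if c = lb then la else c)).count la = l.count la + l.count lb := by
  induction l with
  | nil => simp
  | cons x xs ih =>
    simp only [List.map_cons, List.count_cons, ih]
    split_ifs with h1 h2 h3 <;> simp_all <;> omega

lemma pvCount_map_collapse_ne (l : List Int) (la lb v : Int) (h1 : v ≠ la) (h2 : v ≠ lb) :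
    (l.map (fun c => if c = lb then la else c)).count v = l.count v := by
  induction l with
  | nil => simp
  | cons x xs ih =>
    simp only [List.map_cons, List.count_cons, ih]
    split_ifs with ha hb <;> simp_all

-- ===== the coupling invariant between the union-find state and the label array =====
def pvInv (p s comp : List Int) (n : Nat) : Prop :=
  p.length = n ∧ s.length = n ∧ comp.length = n ∧ pvBnd p ∧ pvTerm p ∧
  (∀ i j, i < n → j < n →
    ((∃ r, pvReach p i r ∧ pvReach p j r) ↔ comp.getD i 0 = comp.getD j 0)) ∧
  (∀ r, r < n → pvStep p r = r → s.getD r 0 = (comp.count (comp.getD r 0) : Int))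

lemma pvReach_exists {p : List Int} (hb : pvBnd p) (ht : pvTerm p) {i : Nat}
    (hi : i < p.length) : ∃ r, pvReach p i r ∧ r < p.length ∧ pvStep p r = r := by
  obtain ⟨m, _, hfix⟩ := ht i hi
  exact ⟨_, ⟨m, rfl, hfix⟩, pvIterate_lt hb hi m, hfix⟩

lemma pvReach_self {p : List Int} {r : Nat} (h : pvStep p r = r) : pvReach p r r :=
  ⟨0, rfl, h⟩
-- ===== reach transfer helpers =====
lemma pvReach_iff_of_forward {p q : List Int} (hb : pvBnd p) (ht : pvTerm p)
    (hf : ∀ i r, pvReach p i r → pvReach q i r) {i : Nat} (hi : i < p.length) (r : Nat) :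
    pvReach q i r ↔ pvReach p i r := by
  constructor
  · intro hq
    obtain ⟨r0, hr0, _, _⟩ := pvReach_exists hb ht hi
    have := pvReach_unique hq (hf i r0 hr0)
    subst this
    exact hr0
  · exact hf i r

lemma pvLabel_iff {p comp : List Int} {n : Nat}
    (h6 : ∀ i j, i < n → j < n →
      ((∃ r, pvReach p i r ∧ pvReach p j r) ↔ comp.getD i 0 = comp.getD j 0))
    {i j ri rj : Nat} (hi : i < n) (hj : j < n)
    (hri : pvReach p i ri) (hrj : pvReach p j rj) :
    comp.getD i 0 = comp.getD j 0 ↔ ri = rj := by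
  rw [← h6 i j hi hj]
  constructor
  · rintro ⟨r, h1, h2⟩
    rw [← pvReach_unique h1 hri, ← pvReach_unique h2 hrj]
  · intro h
    subst h
    exact ⟨ri, hri, hrj⟩

-- ===== the merge preserves the invariant =====
lemma pvMerge_inv {p s comp : List Int} {n : Nat}
    (hlen : p.length = n) (hs : s.length = n) (hc : comp.length = n)
    (hb : pvBnd p) (ht : pvTerm p)
    (h6 : ∀ i j, i < n → j < n →
      ((∃ r, pvReach p i r ∧ pvReach p j r) ↔ comp.getD i 0 = comp.getD j 0))
    (h7 : ∀ r, r < n → pvStep p r = r → s.getD r 0 = (comp.count (comp.getD r 0) : Int))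
    {aN bN ra rb att keep : Nat}
    (haN : aN < n) (hbN : bN < n)
    (hra : pvReach p aN ra) (hrb : pvReach p bN rb)
    (hrane : ra ≠ rb)
    (hsplit : (att = ra ∧ keep = rb) ∨ (att = rb ∧ keep = ra)) :
    pvInv (p.set att ((keep : Nat) : Int)) (s.set keep (s.getD keep 0 + s.getD att 0))
      (comp.map (fun c => if c = comp.getD bN 0 then comp.getD aN 0 else c)) n := by
  have hraF : pvStep p ra = ra := hra.choose_spec.2
  have hrbF : pvStep p rb = rb := hrb.choose_spec.2
  have hraL : ra < n := by
    obtain ⟨m, hm, _⟩ := hra; rw [← hm]; rw [← hlen] at haN ⊢; exact pvIterate_lt hb haN m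
  have hrbL : rb < n := by
    obtain ⟨m, hm, _⟩ := hrb; rw [← hm]; rw [← hlen] at hbN ⊢; exact pvIterate_lt hb hbN m
  have hattL : att < n := by rcases hsplit with ⟨h1, _⟩ | ⟨h1, _⟩ <;> omega
  have hkeepL : keep < n := by rcases hsplit with ⟨_, h1⟩ | ⟨_, h1⟩ <;> omega
  have hattF : pvStep p att = att := by rcases hsplit with ⟨h1, _⟩ | ⟨h1, _⟩ <;> rw [h1] <;> assumption
  have hkeepF : pvStep p keep = keep := by rcases hsplit with ⟨_, h1⟩ | ⟨_, h1⟩ <;> rw [h1] <;> assumption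
  have hkane : keep ≠ att := by rcases hsplit with ⟨h1, h2⟩ | ⟨h1, h2⟩ <;> omega
  have hattL' : att < p.length := by omega
  set la := comp.getD aN 0 with hla
  set lb := comp.getD bN 0 with hlb
  have hlane : la ≠ lb := by
    intro h
    have := (pvLabel_iff h6 haN hbN hra hrb).mp h
    exact hrane this
  -- labels of the two roots
  have hraLab : comp.getD ra 0 = la :=
    (pvLabel_iff h6 hraL haN (pvReach_self hraF) hra).mpr rfl
  have hrbLab : comp.getD rb 0 = lb :=
    (pvLabel_iff h6 hrbL hbN (pvReach_self hrbF) hrb).mpr rfl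
  -- facts about the new parents list
  have hb' : pvBnd (p.set att ((keep : Nat) : Int)) := pvLink_bnd hb hattL' (by omega)
  have ht' : pvTerm (p.set att ((keep : Nat) : Int)) := pvLink_term hattL' hattF hkeepF hkane ht
  refine ⟨by rw [List.length_set]; omega, by rw [List.length_set]; omega,
    by rw [List.length_map]; omega, hb', ht', ?_, ?_⟩
  · -- clause 6
    intro i j hi hj
    obtain ⟨ri, hri, hriL, hriF⟩ := pvReach_exists hb ht (by omega : i < p.length)
    obtain ⟨rj, hrj, hrjL, hrjF⟩ := pvReach_exists hb ht (by omega : j < p.length)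
    have hLHS : (∃ r, pvReach (p.set att ((keep : Nat) : Int)) i r ∧
        pvReach (p.set att ((keep : Nat) : Int)) j r)
        ↔ (if ri = att then keep else ri) = (if rj = att then keep else rj) := by
      constructor
      · rintro ⟨r, h1, h2⟩
        have e1 := pvReach_unique h1 (pvLink_reach hattL' hattF hkeepF hkane i ri hri)
        have e2 := pvReach_unique h2 (pvLink_reach hattL' hattF hkeepF hkane j rj hrj)
        omega
      · intro h
        exact ⟨_, pvLink_reach hattL' hattF hkeepF hkane i ri hri,
          h ▸ pvLink_reach hattL' hattF hkeepF hkane j rj hrj⟩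
    rw [hLHS, pvGetD_map_collapse _ _ _ i (by omega), pvGetD_map_collapse _ _ _ j (by omega)]
    have ei1 : comp.getD i 0 = la ↔ ri = ra := pvLabel_iff h6 hi haN hri hra
    have ei2 : comp.getD i 0 = lb ↔ ri = rb := pvLabel_iff h6 hi hbN hri hrb
    have ej1 : comp.getD j 0 = la ↔ rj = ra := pvLabel_iff h6 hj haN hrj hra
    have ej2 : comp.getD j 0 = lb ↔ rj = rb := pvLabel_iff h6 hj hbN hrj hrb
    have eij : comp.getD i 0 = comp.getD j 0 ↔ ri = rj := pvLabel_iff h6 hi hj hri hrj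
    by_cases h1 : ri = ra <;> by_cases h2 : ri = rb <;>
      by_cases h3 : rj = ra <;> by_cases h4 : rj = rb <;>
      rcases hsplit with ⟨ha1, hk1⟩ | ⟨ha1, hk1⟩ <;>
      simp_all <;> omega
  · -- clause 7
    intro r hr hfix
    rw [pvLink_step hattL'] at hfix
    by_cases hratt : r = att
    · rw [if_pos hratt] at hfix; omega
    · rw [if_neg hratt] at hfix
      rw [pvGetD_map_collapse _ _ _ r (by omega)]
      by_cases hrk : r = keep
      · -- the kept root: size is the sum, label collapses to la
        rw [hrk] at hfix ⊢
        have hkLab : comp.getD keep 0 = la ∨ comp.getD keep 0 = lb := by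
          rcases hsplit with ⟨_, h1⟩ | ⟨_, h1⟩ <;> rw [h1] <;> [right; left] <;>
            first
              | exact hrbLab
              | exact hraLab
        have hsum : s.getD keep 0 + s.getD att 0
            = (comp.count la : Int) + (comp.count lb : Int) := by
          rcases hsplit with ⟨h1, h2⟩ | ⟨h1, h2⟩ <;> subst h1 <;> subst h2 <;>
            rw [h7 _ hkeepL hkeepF, h7 _ hattL hattF, hraLab, hrbLab] <;> omega
        rw [pvGetD_set_self _ _ _ (by omega), hsum]
        have hcol : (if comp.getD keep 0 = lb then la else comp.getD keep 0) = la := by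
          rcases hkLab with h | h
          · rw [h, if_neg hlane]
          · rw [h, if_pos rfl]
        rw [hcol, pvCount_map_collapse_self _ _ _ hlane]
        push_cast
        ring
      · -- an untouched root
        have hrra : r ≠ ra := by rcases hsplit with ⟨h1, h2⟩ | ⟨h1, h2⟩ <;> omega
        have hrrb : r ≠ rb := by rcases hsplit with ⟨h1, h2⟩ | ⟨h1, h2⟩ <;> omega
        have hrLab1 : comp.getD r 0 ≠ la := by
          intro h
          exact hrra ((pvLabel_iff h6 hr haN (pvReach_self hfix) hra).mp h)
        have hrLab2 : comp.getD r 0 ≠ lb := by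
          intro h
          exact hrrb ((pvLabel_iff h6 hr hbN (pvReach_self hfix) hrb).mp h)
        rw [if_neg hrLab2, pvGetD_set_ne _ _ _ _ hrk,
          pvCount_map_collapse_ne _ _ _ _ hrLab1 hrLab2]
        exact h7 r hr hfix
-- ===== invariant transfer and the union specification =====
lemma pvInv_transfer {p q s comp : List Int} {n : Nat} (hinv : pvInv p s comp n)
    (hlenq : q.length = p.length) (hbq : pvBnd q) (htq : pvTerm q)
    (hf : ∀ i r, pvReach p i r → pvReach q i r) : pvInv q s comp n := by
  obtain ⟨hlen, hs, hc, hb, ht, h6, h7⟩ := hinv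
  have hiff : ∀ i, i < n → ∀ r, pvReach q i r ↔ pvReach p i r := fun i hi r =>
    pvReach_iff_of_forward hb ht hf (by omega) r
  have hfixiff : ∀ r, r < n → (pvStep q r = r ↔ pvStep p r = r) := by
    intro r hr
    constructor
    · intro h
      obtain ⟨m, hch, hfx⟩ := (hiff r hr r).mp (pvReach_self h)
      exact hfx
    · intro h
      obtain ⟨m, hch, hfx⟩ := hf r r (pvReach_self h)
      exact hfx
  refine ⟨by omega, hs, hc, hbq, htq, ?_, ?_⟩
  · intro i j hi hj
    rw [← h6 i j hi hj]
    constructor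
    · rintro ⟨r, h1, h2⟩
      exact ⟨r, (hiff i hi r).mp h1, (hiff j hj r).mp h2⟩
    · rintro ⟨r, h1, h2⟩
      exact ⟨r, (hiff i hi r).mpr h1, (hiff j hj r).mpr h2⟩
  · intro r hr hfx
    exact h7 r hr ((hfixiff r hr).mp hfx)

lemma pvUnion_spec {p s comp : List Int} {n : Nat} (hinv : pvInv p s comp n)
    {aN bN : Nat} (haN : aN < n) (hbN : bN < n) :
    pvInv (pvUnion p s (aN : Int) (bN : Int)).1 (pvUnion p s (aN : Int) (bN : Int)).2
      (if comp.getD aN 0 ≠ comp.getD bN 0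
       then comp.map (fun c => if c = comp.getD bN 0 then comp.getD aN 0 else c)
       else comp) n := by
  obtain ⟨hlen, hs, hc, hb, ht, h6, h7⟩ := hinv
  have hnpos : 0 < p.length := by omega
  obtain ⟨m1, hm1le, hfix1⟩ := ht aN (by omega)
  have hNRlt := pvNR_lt hb ht hnpos
  obtain ⟨p1, heq1, hlen1, hb1, hNR1, ht1, hfwd1⟩ :=
    pvFind_spec m1 p aN p.length _ hb ht (by omega) rfl hfix1 (by omega)
  set ra := (pvStep p)^[m1] aN with hra_def
  obtain ⟨m2, hm2le, hfix2⟩ := ht1 bN (by omega)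
  have hNRlt1 : pvNR p1 < p1.length := pvNR_lt hb1 ht1 (by omega)
  obtain ⟨p2, heq2, hlen2, hb2, hNR2, ht2, hfwd2⟩ :=
    pvFind_spec m2 p1 bN p1.length _ hb1 ht1 (by omega) rfl hfix2 (by omega)
  set rb := (pvStep p1)^[m2] bN with hrb_def
  have hinv1 : pvInv p1 s comp n :=
    pvInv_transfer ⟨hlen, hs, hc, hb, ht, h6, h7⟩ hlen1 hb1 ht1 hfwd1
  have hinv2 : pvInv p2 s comp n := pvInv_transfer hinv1 (by omega) hb2 ht2 hfwd2
  obtain ⟨hlen2', hs2, hc2, hb2', ht2', h6₂, h7₂⟩ := hinv2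
  have hraR : pvReach p2 aN ra := hfwd2 _ _ (hfwd1 _ _ ⟨m1, rfl, hfix1⟩)
  have hrbR : pvReach p2 bN rb := hfwd2 _ _ ⟨m2, rfl, hfix2⟩
  have hraLt : ra < n := by
    have := pvIterate_lt hb (show aN < p.length by omega) m1; omega
  have hrbLt : rb < n := by
    have := pvIterate_lt hb1 (show bN < p1.length by omega) m2; omega
  simp only [pvUnion, heq1, heq2, PySem.List.pyGetD_natCast]
  by_cases hrr : ra = rb
  · have hlab : comp.getD aN 0 = comp.getD bN 0 :=
      (pvLabel_iff h6₂ haN hbN hraR hrbR).mpr hrr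
    rw [if_pos (by exact_mod_cast congrArg (fun x : Nat => (x : Int)) hrr),
      if_neg (not_not_intro hlab)]
    exact ⟨hlen2', hs2, hc2, hb2', ht2', h6₂, h7₂⟩
  · have hlabne : comp.getD aN 0 ≠ comp.getD bN 0 := fun h =>
      hrr ((pvLabel_iff h6₂ haN hbN hraR hrbR).mp h)
    rw [if_neg (by exact_mod_cast fun h => hrr (by exact_mod_cast h)), if_pos hlabne]
    by_cases hcmp : s.getD ra 0 < s.getD rb 0
    · rw [if_pos hcmp]
      simp only [PySem.List.pyGetD_natCast, PySem.List.pySetD_natCast]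
      exact pvMerge_inv hlen2' hs2 hc2 hb2' ht2' h6₂ h7₂ haN hbN hraR hrbR hrr
        (Or.inl ⟨rfl, rfl⟩)
    · rw [if_neg hcmp]
      simp only [PySem.List.pyGetD_natCast, PySem.List.pySetD_natCast]
      exact pvMerge_inv hlen2' hs2 hc2 hb2' ht2' h6₂ h7₂ haN hbN hraR hrbR hrr
        (Or.inr ⟨rfl, rfl⟩)
-- ===== folding the selected edges =====
lemma pvFold_inv (es : List (Int × Int × Int)) :
    ∀ (p s comp : List Int) {n : Nat}, pvInv p s comp n →
    (∀ e ∈ es, ∃ aN bN : Nat, e.2.1 = (aN : Int) ∧ e.2.2 = (bN : Int) ∧ aN < n ∧ bN < n) →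
    pvInv (es.foldl (fun st e => pvUnion st.1 st.2 e.2.1 e.2.2) (p, s)).1
          (es.foldl (fun st e => pvUnion st.1 st.2 e.2.1 e.2.2) (p, s)).2
          (es.foldl (fun comp e =>
             let la := PySem.List.pyGetD comp e.2.1 0
             let lb := PySem.List.pyGetD comp e.2.2 0
             if la ≠ lb then comp.map (fun c => if c = lb then la else c) else comp) comp) n := by
  induction es with
  | nil => intro p s comp n hinv _; exact hinv
  | cons e es ih =>
    intro p s comp n hinv hbnd
    obtain ⟨aN, bN, ha, hb, haN, hbN⟩ := hbnd e (by simp)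
    simp only [List.foldl_cons, ha, hb, PySem.List.pyGetD_natCast]
    have hnext := pvUnion_spec hinv haN hbN
    have := ih (pvUnion p s (aN : Int) (bN : Int)).1 (pvUnion p s (aN : Int) (bN : Int)).2
      _ hnext (fun e' he' => hbnd e' (by simp [he']))
    simpa using this

-- ===== the initial state satisfies the invariant =====
lemma pvRange_getD {n i : Nat} (hi : i < n) :
    (PySem.List.pyRange 0 (n : Int) 1).getD i 0 = (i : Int) := by
  have hlen : (PySem.List.pyRange 0 (n : Int) 1).length = n := by
    rw [PySem.List.length_pyRange_one]; simp
  rw [List.getD_eq_getElem?_getD, List.getElem?_eq_getElem (by omega)]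
  rw [PySem.List.getElem_pyRange_one]
  simp

lemma pvInit_step {n i : Nat} (hi : i < n) :
    pvStep (PySem.List.pyRange 0 (n : Int) 1) i = i := by
  unfold pvStep
  rw [pvRange_getD hi]
  simp

lemma pvInit_reach {n : Nat} {i r : Nat} (hi : i < n) :
    pvReach (PySem.List.pyRange 0 (n : Int) 1) i r ↔ r = i := by
  constructor
  · rintro ⟨m, hch, _⟩
    rw [Function.iterate_fixed (pvInit_step hi)] at hch
    omega
  · rintro rfl
    exact pvReach_self (pvInit_step hi)

lemma pvInit_inv (n : Nat) :
    pvInv (PySem.List.pyRange 0 (n : Int) 1) (List.replicate n 1)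
      (PySem.List.pyRange 0 (n : Int) 1) n := by
  have hlen : (PySem.List.pyRange 0 (n : Int) 1).length = n := by
    rw [PySem.List.length_pyRange_one]; simp
  refine ⟨hlen, by simp, hlen, ?_, ?_, ?_, ?_⟩
  · intro i hi
    rw [hlen] at hi
    rw [pvRange_getD hi]
    constructor
    · omega
    · simpa [hlen] using hi
  · intro i hi
    rw [hlen] at hi
    exact ⟨0, Nat.zero_le _, by simpa using pvInit_step hi⟩
  · intro i j hi hj
    rw [pvRange_getD hi, pvRange_getD hj]
    constructor
    · rintro ⟨r, h1, h2⟩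
      have e1 := (pvInit_reach hi).mp h1
      have e2 := (pvInit_reach hj).mp h2
      omega
    · intro h
      have : i = j := by omega
      subst this
      exact ⟨i, (pvInit_reach hi).mpr rfl, (pvInit_reach hi).mpr rfl⟩
  · intro r hr _
    rw [List.getD_eq_getElem?_getD, List.getElem?_eq_getElem (by simpa using hr)]
    rw [pvRange_getD hr]
    have hmem : (r : Int) ∈ PySem.List.pyRange 0 (n : Int) 1 := by
      rw [PySem.List.mem_pyRange_one]
      constructor <;> omega
    have hnd := PySem.List.nodup_pyRange_one (a := 0) (b := (n : Int))
    rw [List.count_eq_one_of_mem] <;> simp_all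
-- ===== the final root-collection loop =====
lemma pvFinal_loop (s p0 : List Int) {n : Nat} :
    ∀ mN, mN ≤ n → ∀ (q acc : List Int),
      q.length = n → pvBnd q → pvTerm q →
      (∀ i, i < n → ∀ r, pvReach q i r ↔ pvReach p0 i r) →
      ((PySem.List.pyRange 0 (mN : Int) 1).foldl
          (fun acc idx =>
            let fr := pvFind acc.1.length acc.1 idx
            if fr.2 = idx then (fr.1, acc.2 ++ [PySem.List.pyGetD s fr.2 0])
            else (fr.1, acc.2)) (q, acc)).2
        = acc ++ ((List.range mN).filter (fun r => decide (pvStep p0 r = r))).map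
            (fun r => s.getD r 0)
      ∧ (let F := (PySem.List.pyRange 0 (mN : Int) 1).foldl
          (fun acc idx =>
            let fr := pvFind acc.1.length acc.1 idx
            if fr.2 = idx then (fr.1, acc.2 ++ [PySem.List.pyGetD s fr.2 0])
            else (fr.1, acc.2)) (q, acc)
         F.1.length = n ∧ pvBnd F.1 ∧ pvTerm F.1 ∧
           (∀ i, i < n → ∀ r, pvReach F.1 i r ↔ pvReach p0 i r)) := by
  intro mN
  induction mN with
  | zero =>
    intro _ q acc hlen hb ht hreach
    have h0 : PySem.List.pyRange 0 ((0 : Nat) : Int) 1 = [] := by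
      apply PySem.List.pyRange_one_eq_nil
      simp
    constructor
    · rw [h0]
      simp
    · simp only [h0, List.foldl_nil]
      exact ⟨hlen, hb, ht, hreach⟩
  | succ m ih =>
    intro hm q acc hlen hb ht hreach
    have hsplit : PySem.List.pyRange 0 ((m + 1 : Nat) : Int) 1
        = PySem.List.pyRange 0 ((m : Nat) : Int) 1 ++ [((m : Nat) : Int)] := by
      push_cast
      exact PySem.List.pyRange_one_succ_right (by positivity)
    obtain ⟨hacc, hq⟩ := ih (by omega) q acc hlen hb ht hreach
    simp only at hq
    obtain ⟨hlen', hb', ht', hreach'⟩ := hq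
    rw [hsplit, List.foldl_append]
    set F := (PySem.List.pyRange 0 ((m : Nat) : Int) 1).foldl
        (fun acc idx =>
          let fr := pvFind acc.1.length acc.1 idx
          if fr.2 = idx then (fr.1, acc.2 ++ [PySem.List.pyGetD s fr.2 0])
          else (fr.1, acc.2)) (q, acc) with hF
    -- the step at index m
    obtain ⟨mm, hmmle, hfix⟩ := ht' m (by omega)
    have hNRlt : pvNR F.1 < F.1.length := pvNR_lt hb' ht' (by omega)
    obtain ⟨q', heq, hlenq', hbq', hNRq', htq', hfwdq'⟩ :=
      pvFind_spec mm F.1 m F.1.length _ hb' ht' (by omega) rfl hfix (by omega)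
    set r := (pvStep F.1)^[mm] m with hr_def
    have hrReach : pvReach F.1 m r := ⟨mm, rfl, hfix⟩
    have hroot_iff : r = m ↔ pvStep p0 m = m := by
      constructor
      · intro h
        obtain ⟨_, _, hfx⟩ := (hreach' m (by omega) m).mp (h ▸ hrReach)
        exact hfx
      · intro h
        exact pvReach_unique hrReach ((hreach' m (by omega) m).mpr (pvReach_self h))
    have hreach'' : ∀ i, i < n → ∀ rr, pvReach q' i rr ↔ pvReach p0 i rr := by
      intro i hi rr
      rw [pvReach_iff_of_forward hb' ht' hfwdq' (by omega) rr]
      exact hreach' i hi rr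
    constructor
    · simp only [List.foldl_cons, List.foldl_nil, heq]
      rw [List.range_succ, List.filter_append, List.map_append, hacc]
      by_cases hroot : pvStep p0 m = m
      · rw [if_pos (by exact_mod_cast congrArg (fun x : Nat => (x : Int)) (hroot_iff.mpr hroot))]
        simp only [PySem.List.pyGetD_natCast]
        have : r = m := hroot_iff.mpr hroot
        simp [this, hroot, List.append_assoc]
      · rw [if_neg (by
          intro hcte
          exact hroot (hroot_iff.mp (by exact_mod_cast hcte)))]
        simp [hroot]
    · simp only [List.foldl_cons, List.foldl_nil, heq]
      by_cases hroot : pvStep p0 m = m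
      · rw [if_pos (by exact_mod_cast congrArg (fun x : Nat => (x : Int)) (hroot_iff.mpr hroot))]
        exact ⟨show q'.length = n by omega, hbq', htq', hreach''⟩
      · rw [if_neg (by
          intro hcte
          exact hroot (hroot_iff.mp (by exact_mod_cast hcte)))]
        exact ⟨show q'.length = n by omega, hbq', htq', hreach''⟩
-- ===== relating the collected sizes to the label counts =====
lemma pvRoots_labels_perm {p s comp : List Int} {n : Nat} (hinv : pvInv p s comp n) :
    (((List.range n).filter (fun r => decide (pvStep p r = r))).map (fun r => s.getD r 0)).Perm
      ((PySem.Set.ofList comp).map (fun c => (comp.count c : Int))) := by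
  obtain ⟨hlen, hs, hc, hb, ht, h6, h7⟩ := hinv
  set roots := (List.range n).filter (fun r => decide (pvStep p r = r)) with hroots
  have hmemroots : ∀ r, r ∈ roots ↔ r < n ∧ pvStep p r = r := by
    intro r
    simp [hroots, List.mem_filter]
  have h1 : roots.map (fun r => s.getD r 0)
      = (roots.map (fun r => comp.getD r 0)).map (fun c => (comp.count c : Int)) := by
    rw [List.map_map]
    apply List.map_congr_left
    intro r hr
    obtain ⟨hrn, hrf⟩ := (hmemroots r).mp hr
    exact h7 r hrn hrf
  rw [h1]
  apply List.Perm.map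
  rw [List.perm_ext_iff_of_nodup, ]
  · intro x
    constructor
    · intro hx
      obtain ⟨r, hr, rfl⟩ := List.mem_map.mp hx
      obtain ⟨hrn, _⟩ := (hmemroots r).mp hr
      rw [PySem.Set.mem_ofList]
      rw [List.getD_eq_getElem?_getD, List.getElem?_eq_getElem (by omega)]
      exact List.getElem_mem _
    · intro hx
      rw [PySem.Set.mem_ofList] at hx
      obtain ⟨i, hi, rfl⟩ := List.mem_iff_getElem.mp hx
      have hin : i < n := by omega
      obtain ⟨r, hreach, hrL, hrF⟩ := pvReach_exists hb ht (show i < p.length by omega)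
      have hlab : comp.getD i 0 = comp.getD r 0 :=
        (h6 i r hin (by omega)).mp ⟨r, hreach, pvReach_self hrF⟩
      apply List.mem_map.mpr
      refine ⟨r, (hmemroots r).mpr ⟨by omega, hrF⟩, ?_⟩
      rw [← hlab, List.getD_eq_getElem?_getD, List.getElem?_eq_getElem hi]
      rfl
  · apply List.Nodup.map_on
    · intro x hx y hy hxy
      obtain ⟨hxn, hxf⟩ := (hmemroots x).mp hx
      obtain ⟨hyn, hyf⟩ := (hmemroots y).mp hy
      exact (pvLabel_iff h6 hxn hyn (pvReach_self hxf) (pvReach_self hyf)).mp hxy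
    · exact (List.nodup_range).filter _
  · exact PySem.Set.nodup_ofList _

-- ===== equal multisets sort (descending) equally =====
lemma pvSorted_rev_eq_of_perm {xs ys : List Int} (h : xs.Perm ys) :
    PySem.List.sorted xs (fun x => x) true = PySem.List.sorted ys (fun x => x) true := by
  have hp : (PySem.List.sorted xs (fun x => x) true).Perm
      (PySem.List.sorted ys (fun x => x) true) :=
    (PySem.List.sorted_perm xs _ true).trans (h.trans (PySem.List.sorted_perm ys _ true).symm)
  exact List.eq_of_perm_of_sorted (fun a b _ _ h1 h2 => le_antisymm h2 h1)
    (PySem.List.sorted_pairwise_rev xs _) (PySem.List.sorted_pairwise_rev ys _) hp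

-- ===== the counting dict's values =====
lemma pvCounter_values (comp : List Int) :
    (comp.foldl (fun d c => PySem.Dict.modify d c 0 (· + 1)) PySem.Dict.empty).values
      = (PySem.Set.ofList comp).map (fun c => (comp.count c : Int)) := by
  rw [← PySem.Dict.counter_eq_foldl]
  show (PySem.Dict.counter comp).items.map (·.2)
      = (PySem.Set.ofList comp).map (fun c => (comp.count c : Int))
  rw [PySem.Dict.items_counter, List.map_map]
  rfl
-- ===== the two edge constructions build the same list =====
lemma pvEdgesA_eq (points : List (Int × Int × Int)) :
    sortedEdges_py points
      = PySem.List.sorted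
          ((PySem.List.pyRange 0 (points.length : Int) 1).flatMap (fun i =>
            (PySem.List.pyRange (i + 1) (points.length : Int) 1).map (fun j =>
              let pi := PySem.List.pyGetD points i (0, 0, 0)
              let pj := PySem.List.pyGetD points j (0, 0, 0)
              ((pi.1 - pj.1) ^ 2 + (pi.2.1 - pj.2.1) ^ 2 + (pi.2.2 - pj.2.2) ^ 2, i, j))))
          (fun e => e.1) false := by
  unfold sortedEdges_py
  rw [show (fun (acc : List (Int × Int × Int)) (ip : Int × Int × Int × Int) =>
        (PySem.List.pyRange (ip.1 + 1) (points.length : Int) 1).foldl (fun acc2 j =>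
          let p2 := PySem.List.pyGetD points j (0, 0, 0)
          let dist_sq := (ip.2.1 - p2.1) ^ 2 + (ip.2.2.1 - p2.2.1) ^ 2 + (ip.2.2.2 - p2.2.2) ^ 2
          acc2 ++ [(dist_sq, ip.1, j)]) acc)
      = (fun acc ip =>
        acc ++ (PySem.List.pyRange (ip.1 + 1) (points.length : Int) 1).map (fun j =>
          let p2 := PySem.List.pyGetD points j (0, 0, 0)
          ((ip.2.1 - p2.1) ^ 2 + (ip.2.2.1 - p2.2.1) ^ 2 + (ip.2.2.2 - p2.2.2) ^ 2, ip.1, j)))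
      from funext fun acc => funext fun ip => PySem.List.foldl_append_singleton_eq_map _ _ _]
  rw [PySem.List.foldl_append_eq_flatMap, List.nil_append]
  rw [PySem.List.enumerate_eq_map_pyRange points (0, 0, 0), List.flatMap_map]
  rfl

lemma pvEdges_bounds (points : List (Int × Int × Int)) (k : Int) :
    ∀ e ∈ PySem.List.slice
        (PySem.List.sorted
          ((PySem.List.pyRange 0 (points.length : Int) 1).flatMap (fun i =>
            (PySem.List.pyRange (i + 1) (points.length : Int) 1).map (fun j =>
              let pi := PySem.List.pyGetD points i (0, 0, 0)
              let pj := PySem.List.pyGetD points j (0, 0, 0)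
              ((pi.1 - pj.1) ^ 2 + (pi.2.1 - pj.2.1) ^ 2 + (pi.2.2 - pj.2.2) ^ 2, i, j))))
          (fun e => e.1) false) none (some k),
      ∃ aN bN : Nat, e.2.1 = (aN : Int) ∧ e.2.2 = (bN : Int) ∧
        aN < points.length ∧ bN < points.length := by
  intro e he
  have he1 := PySem.List.mem_of_mem_slice _ _ _ he
  rw [PySem.List.mem_sorted] at he1
  obtain ⟨i, hi, he2⟩ := List.mem_flatMap.mp he1
  obtain ⟨j, hj, rfl⟩ := List.mem_map.mp he2
  rw [PySem.List.mem_pyRange_one] at hi hj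
  refine ⟨i.toNat, j.toNat, ?_, ?_, by omega, by omega⟩
  · show i = _
    omega
  · show j = _
    omega
-- ===== assembling the equivalence =====
lemma pvMain (points : List (Int × Int × Int)) (k : Int) :
    component_sizes_after_k_edges_py points k = component_sizes_after_k_edges_py_alt points k := by
  simp only [component_sizes_after_k_edges_py, component_sizes_after_k_edges_py_alt]
  rw [pvEdgesA_eq]
  set n := points.length with hn
  set E := PySem.List.slice
      (PySem.List.sorted
        ((PySem.List.pyRange 0 (n : Int) 1).flatMap (fun i =>
          (PySem.List.pyRange (i + 1) (n : Int) 1).map (fun j =>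
            let pi := PySem.List.pyGetD points i (0, 0, 0)
            let pj := PySem.List.pyGetD points j (0, 0, 0)
            ((pi.1 - pj.1) ^ 2 + (pi.2.1 - pj.2.1) ^ 2 + (pi.2.2 - pj.2.2) ^ 2, i, j))))
        (fun e => e.1) false) none (some k) with hE
  have hbounds : ∀ e ∈ E, ∃ aN bN : Nat, e.2.1 = (aN : Int) ∧ e.2.2 = (bN : Int) ∧
      aN < n ∧ bN < n := pvEdges_bounds points k
  have hInv := pvFold_inv E (PySem.List.pyRange 0 (n : Int) 1) (List.replicate n 1)
    (PySem.List.pyRange 0 (n : Int) 1) (pvInit_inv n) hbounds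
  set ST := E.foldl (fun st e => pvUnion st.1 st.2 e.2.1 e.2.2)
      (PySem.List.pyRange 0 (n : Int) 1, List.replicate n 1) with hST
  set C := E.foldl (fun comp e =>
      let la := PySem.List.pyGetD comp e.2.1 0
      let lb := PySem.List.pyGetD comp e.2.2 0
      if la ≠ lb then comp.map (fun c => if c = lb then la else c) else comp)
      (PySem.List.pyRange 0 (n : Int) 1) with hC
  obtain ⟨hlen, hs, hc, hb, ht, h6, h7⟩ := hInv
  have hfin := (pvFinal_loop ST.2 ST.1 n (le_refl n) ST.1 [] hlen hb ht
    (fun i hi r => Iff.rfl)).1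
  rw [hfin, List.nil_append]
  rw [pvCounter_values]
  exact pvSorted_rev_eq_of_perm (pvRoots_labels_perm ⟨hlen, hs, hc, hb, ht, h6, h7⟩)

-- ===== VERDICT (by name: the statement is the Claim_ definition above) =====
theorem component_sizes_after_k_edges_py_spec : Claim_equal_component_sizes_after_k_edges_py := by
  intro points k _
  unfold Spec_component_sizes_after_k_edges_py
  exact pvMain points k
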